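-- pv_equiv track=rewrite | github.com/HelloGGX/Algorithm-Exercises | 10.22.py | baggage_schedule_final
-- ===== SOURCE A (Python) =====
-- from collections import defaultdict, deque
--
-- def baggage_schedule_final(N: int, baggage: list[tuple]) -> int:
--     if not baggage:
--         return 0
--
--     # 1. 准备状态
--     waiting_bags = defaultdict(list)
--     for start, target in baggage:
--         waiting_bags[start].append(target)
--
--     # 这个列表追踪所有在传送带上的行李和它们的当前位置
--     on_belt = []
--
--     total_bags = len(baggage)
--     delivered_count = 0
--     time = 0
--
--     # 2. 基于时间的主循环
--     while delivered_count < total_bags: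
--         # a) 移动所有在带上的行李
--         for i, bag in enumerate(on_belt):
--             # 每个行李的位置+1，并循环
--             current_station_pos, target = bag
--             on_belt[i] = ((current_station_pos + 1) % N, target)
--
--         # b) 取下到站的行李
--         remaining_on_belt = []
--         for current_pos, target_pos in on_belt:
--             if current_pos == target_pos:
--                 delivered_count += 1
--             else:
--                 remaining_on_belt.append((current_pos, target_pos))
--         on_belt = remaining_on_belt
--
--         # c) 放上等待的行李
--         current_station_pos = time % N
--         if current_station_pos in waiting_bags:
--             for target in waiting_bags[current_station_pos]:
--                 on_belt.append((current_station_pos, target))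
--             del waiting_bags[current_station_pos]
--
--         # d) 时间流逝
--         time += 1
--
--     return time
-- ===== SOURCE B (Python) =====
-- def baggage_schedule_final(N: int, baggage: list[tuple]) -> int:
--     # Closed form: the belt has abs(N) stations (Python's % makes negative N mirror the
--     # positive case); bag (s, t) is loaded at minute s % M and delivered at minute
--     # s % M + ((t - s - 1) % M) + 1; the loop exits one minute after the last delivery.
--     if not baggage:
--         return 0
--     M = abs(N)
--     return max(s % M + (t - s - 1) % M + 1 for s, t in baggage) + 1
-- ===== Notes on version B (the rewrite author's own statement) =====
-- stated objective: faster
-- what changed: B replaces A's minute-by-minute simulation of the circular belt (a dict of waiting bags, a belt list moved and filtered every time step) with a closed-form formula: each bag (s,t) is loaded at minute s % abs(N) and delivered (t-s-1) % abs(N) + 1 minutes later, so the answer is the maximum of that over all bags plus 1 (0 for no bags).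
import Mathlib
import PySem

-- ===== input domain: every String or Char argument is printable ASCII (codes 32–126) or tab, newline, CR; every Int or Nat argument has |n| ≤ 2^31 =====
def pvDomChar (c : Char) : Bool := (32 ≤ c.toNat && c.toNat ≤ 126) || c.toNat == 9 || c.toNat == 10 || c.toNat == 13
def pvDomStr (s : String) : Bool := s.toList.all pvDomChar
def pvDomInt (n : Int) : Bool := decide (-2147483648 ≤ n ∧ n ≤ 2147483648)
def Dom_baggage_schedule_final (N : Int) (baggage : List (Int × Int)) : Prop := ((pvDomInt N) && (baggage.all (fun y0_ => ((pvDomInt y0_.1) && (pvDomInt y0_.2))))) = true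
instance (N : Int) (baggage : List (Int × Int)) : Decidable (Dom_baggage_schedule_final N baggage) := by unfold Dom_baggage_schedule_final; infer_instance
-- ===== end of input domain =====

-- B replaces A's minute-by-minute belt simulation by the closed-form maximum delivery
-- minute max(s %% M + ((t-s-1) %% M) + 1) + 1 over the bags, M = |N| (objective: faster).


-- ===== PORT A =====
-- waiting_bags = defaultdict(list); for start, target in baggage: waiting_bags[start].append(target)
def pvBuildWaiting (baggage : List (Int × Int)) : PySem.Dict Int (List Int) :=
  baggage.foldl (fun d p => d.modify p.1 [] (· ++ [p.2])) PySem.Dict.empty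

-- the 'while delivered_count < total_bags' loop of A; the fuel argument is a totality guard only
def pvLoopA (N total : Int) : Nat → PySem.Dict Int (List Int) → List (Int × Int) → Int → Int → Int
  | 0, _, _, _, time => time
  | fuel + 1, waiting, onBelt, delivered, time =>
    if delivered < total then
      -- a) move every on-belt bag one station on
      let moved := onBelt.map (fun b => (PySem.Int.mod (b.1 + 1) N, b.2))
      -- b) take off arrived bags (count them), keep the rest
      let st := moved.foldl
        (fun s b => (if b.1 == b.2 then s.1 + 1 else s.1,
                     if b.1 == b.2 then s.2 else s.2 ++ [b]))
        (delivered, ([] : List (Int × Int)))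
      -- c) load the bags waiting at the current station
      let pos := PySem.Int.mod time N
      if waiting.contains pos then
        pvLoopA N total fuel (waiting.erase pos)
          (st.2 ++ (waiting.getD pos []).map (fun t => (pos, t))) st.1 (time + 1)
      else
        pvLoopA N total fuel waiting st.2 st.1 (time + 1)
    else time


def baggage_schedule_final (N : Int) (baggage : List (Int × Int)) : Int :=
  if baggage.isEmpty then 0
  else pvLoopA N (baggage.length : Int) (2 * N.natAbs + 2) (pvBuildWaiting baggage) [] 0 0

-- ===== PORT B =====
def baggage_schedule_final_alt (N : Int) (baggage : List (Int × Int)) : Int :=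
  if baggage.isEmpty then 0
  else
    let M : Int := (N.natAbs : Int)
    match PySem.List.max? (baggage.map
        (fun b => PySem.Int.mod b.1 M + PySem.Int.mod (b.2 - b.1 - 1) M + 1)) (fun x => x) with
    | none => 0   -- unreachable: baggage is nonempty
    | some m => m + 1


-- ===== PRECONDITION & SPEC =====
-- Pre_ keeps exactly the inputs on which A terminates: the empty list, or N ≠ 0 with every
-- start/target a reachable station, i.e. its own Python residue modulo N. Outside it A raises
-- ZeroDivisionError (N = 0 with bags) or loops forever (a station that never equals time % N).
def Pre_baggage_schedule_final (N : Int) (baggage : List (Int × Int)) : Prop :=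
  baggage = [] ∨ (N ≠ 0 ∧ ∀ b ∈ baggage, PySem.Int.mod b.1 N = b.1 ∧ PySem.Int.mod b.2 N = b.2)
instance (N : Int) (baggage : List (Int × Int)) : Decidable (Pre_baggage_schedule_final N baggage) := by unfold Pre_baggage_schedule_final; infer_instance
def pvWitness_baggage_schedule_final : Int × (List (Int × Int)) := (3, [(0, 2), (1, 0), (2, 2)])

def Spec_baggage_schedule_final (N : Int) (baggage : List (Int × Int)) (out : Int) : Prop := out = baggage_schedule_final_alt N baggage
instance (N : Int) (baggage : List (Int × Int)) (out : Int) : Decidable (Spec_baggage_schedule_final N baggage out) := by unfold Spec_baggage_schedule_final; infer_instance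

-- ===== CLAIM (what is proved, stated in full; the proofs are below) =====
def Claim_equal_baggage_schedule_final : Prop := ∀ (N : Int) (baggage : List (Int × Int)), Dom_baggage_schedule_final N baggage → Pre_baggage_schedule_final N baggage → Spec_baggage_schedule_final N baggage (baggage_schedule_final N baggage)

-- ===== LEMMAS AND PROOFS =====

-- delivery minute of bag b = (start, target) on a belt with |N| stations
def pvD (N : Int) (b : Int × Int) : Int :=
  b.1 % (N.natAbs : Int) + (b.2 - b.1 - 1) % (N.natAbs : Int) + 1

-- membership of the window of Python residues modulo N
def pvInW (N x : Int) : Prop :=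
  (0 < N → 0 ≤ x ∧ x < (N.natAbs : Int)) ∧ (N < 0 → -(N.natAbs : Int) < x ∧ x ≤ 0)

lemma fm_sub_dvd (N x : Int) : ((N.natAbs : Int)) ∣ (x - PySem.Int.mod x N) := by
  have h := PySem.Int.floordiv_mul_add_mod x N
  have h2 : x - PySem.Int.mod x N = PySem.Int.floordiv x N * N := by linarith
  rw [h2]
  exact (Int.natAbs_dvd.mpr dvd_rfl).mul_left _

lemma fm_modeq (N x : Int) : PySem.Int.mod x N ≡ x [ZMOD (N.natAbs : Int)] :=
  Int.modEq_iff_dvd.mpr (fm_sub_dvd N x)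

lemma fm_win (N x : Int) : pvInW N (PySem.Int.mod x N) := by
  constructor
  · intro hpos
    exact ⟨PySem.Int.mod_nonneg x hpos, by
      have := PySem.Int.mod_lt x hpos
      omega⟩
  · intro hneg
    have := PySem.Int.mod_neg_bounds x hneg
    constructor <;> omega

lemma fm_inj {N a b : Int} (hN : N ≠ 0) (ha : pvInW N a) (hb : pvInW N b)
    (h : a ≡ b [ZMOD (N.natAbs : Int)]) : a = b := by
  have hM : 0 < (N.natAbs : Int) := by
    have := Int.natAbs_pos.mpr hN
    omega
  have hsub : (a - b) % (N.natAbs : Int) = 0 :=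
    Int.emod_eq_emod_iff_emod_sub_eq_zero.mp h
  have hbnd : -(N.natAbs : Int) < a - b ∧ a - b < (N.natAbs : Int) := by
    unfold pvInW at ha hb
    rcases lt_or_gt_of_ne hN with hneg | hpos
    · have h1 := ha.2 hneg; have h2 := hb.2 hneg; omega
    · have h1 := ha.1 hpos; have h2 := hb.1 hpos; omega
  by_cases hab : b ≤ a
  · have := Int.emod_eq_of_lt (a := a - b) (b := (N.natAbs : Int)) (by omega) (by omega)
    omega
  · have hsub' : (b - a) % (N.natAbs : Int) = 0 :=
      Int.emod_eq_emod_iff_emod_sub_eq_zero.mp h.symm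
    have := Int.emod_eq_of_lt (a := b - a) (b := (N.natAbs : Int)) (by omega) (by omega)
    omega

lemma fm_congr {N a b : Int} (hN : N ≠ 0) (h : a ≡ b [ZMOD (N.natAbs : Int)]) :
    PySem.Int.mod a N = PySem.Int.mod b N :=
  fm_inj hN (fm_win N a) (fm_win N b) (((fm_modeq N a).trans h).trans (fm_modeq N b).symm)

lemma pvInW_of_canon {N x : Int} (hx : PySem.Int.mod x N = x) : pvInW N x := hx ▸ fm_win N x

lemma pvD_bounds {N : Int} (hN : N ≠ 0) (b : Int × Int) :
    b.1 % (N.natAbs : Int) + 1 ≤ pvD N b ∧ pvD N b ≤ b.1 % (N.natAbs : Int) + (N.natAbs : Int) := by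
  have hM : ((N.natAbs : Int)) ≠ 0 := by
    have := Int.natAbs_pos.mpr hN; omega
  have h1 := Int.emod_nonneg (b.2 - b.1 - 1) hM
  have h2 := Int.emod_lt_of_pos (b.2 - b.1 - 1) (by omega : (0:Int) < (N.natAbs : Int))
  unfold pvD; omega

lemma pvD_key {N s t τ : Int} (hN : N ≠ 0) (_hs : PySem.Int.mod s N = s)
    (ht : PySem.Int.mod t N = t) (hsτ : s % (N.natAbs : Int) < τ) (hτd : τ ≤ pvD N (s, t)) :
    (PySem.Int.mod τ N = t ↔ pvD N (s, t) = τ) := by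
  have hM : (0:Int) < (N.natAbs : Int) := by
    have := Int.natAbs_pos.mpr hN; omega
  have hr0 : 0 ≤ (t - s - 1) % (N.natAbs : Int) := Int.emod_nonneg _ (by omega)
  have hrN : (t - s - 1) % (N.natAbs : Int) < (N.natAbs : Int) := Int.emod_lt_of_pos _ hM
  have hl0 : 0 ≤ s % (N.natAbs : Int) := Int.emod_nonneg _ (by omega)
  have hpv : pvD N (s, t) = s % (N.natAbs : Int) + (t - s - 1) % (N.natAbs : Int) + 1 := rfl
  have hmod : pvD N (s, t) ≡ t [ZMOD (N.natAbs : Int)] := by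
    have hls : s % (N.natAbs : Int) ≡ s [ZMOD (N.natAbs : Int)] := Int.emod_emod_of_dvd _ dvd_rfl
    have hrs : (t - s - 1) % (N.natAbs : Int) ≡ t - s - 1 [ZMOD (N.natAbs : Int)] :=
      Int.emod_emod_of_dvd _ dvd_rfl
    have h3 := (hls.add hrs).add_right 1
    rw [show s + (t - s - 1) + 1 = t by ring] at h3
    rw [hpv]; exact h3
  constructor
  · intro h
    have hτt : τ ≡ t [ZMOD (N.natAbs : Int)] := (h ▸ fm_modeq N τ).symm
    have hsub : (pvD N (s, t) - τ) % (N.natAbs : Int) = 0 :=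
      Int.emod_eq_emod_iff_emod_sub_eq_zero.mp (hmod.trans hτt.symm)
    have hlt : pvD N (s, t) - τ < (N.natAbs : Int) := by rw [hpv]; omega
    have := Int.emod_eq_of_lt (by omega : (0:Int) ≤ pvD N (s, t) - τ) hlt
    omega
  · intro h
    rw [h] at hmod
    exact fm_inj hN (fm_win N τ) (pvInW_of_canon ht) ((fm_modeq N τ).trans hmod)

lemma canon_residue_eq {N k τ : Int} (hN : N ≠ 0) (hk : PySem.Int.mod k N = k)
    (h : k % (N.natAbs : Int) = τ % (N.natAbs : Int)) : k = PySem.Int.mod τ N :=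
  fm_inj hN (pvInW_of_canon hk) (fm_win N τ) (Int.ModEq.trans h (fm_modeq N τ).symm)

lemma fm_step {N : Int} (hN : N ≠ 0) (τ : Int) :
    PySem.Int.mod (PySem.Int.mod (τ - 1) N + 1) N = PySem.Int.mod τ N := by
  refine fm_congr hN ?_
  have h := (fm_modeq N (τ - 1)).add_right 1
  rw [show τ - 1 + 1 = τ by ring] at h
  exact h

lemma load_pos (N τ : Int) : (PySem.Int.mod τ N) % (N.natAbs : Int) = τ % (N.natAbs : Int) :=
  fm_modeq N τ

lemma emod_le_self {τ M : Int} (hτ : 0 ≤ τ) (hM : 0 < M) : τ % M ≤ τ := by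
  by_cases h : τ < M
  · rw [Int.emod_eq_of_lt hτ h]
  · have := Int.emod_lt_of_pos τ hM
    omega

lemma point_count {N τ : Int} (hN : N ≠ 0) (b : Int × Int)
    (hb : PySem.Int.mod b.1 N = b.1 ∧ PySem.Int.mod b.2 N = b.2) :
    ((PySem.Int.mod τ N == b.2) && (decide (b.1 % (N.natAbs : Int) < τ) && decide (τ ≤ pvD N b)))
      = decide (pvD N b = τ) := by
  have hbp : pvD N (b.1, b.2) = pvD N b := rfl
  have hbd := pvD_bounds hN b
  by_cases h1 : b.1 % (N.natAbs : Int) < τ ∧ τ ≤ pvD N b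
  · have hiff := pvD_key hN hb.1 hb.2 h1.1 (hbp ▸ h1.2)
    rw [hbp] at hiff
    simp only [h1.1, h1.2, decide_true, Bool.and_true]
    rw [Bool.eq_iff_iff]
    simp [hiff]
  · have hnot : ¬ pvD N b = τ := by
      intro he
      exact h1 ⟨by omega, by omega⟩
    simp only [hnot, decide_false, Bool.and_eq_false_iff]
    right
    rcases not_and_or.mp h1 with h | h
    · left; simpa using h
    · right; simpa using h

lemma point_rem {N τ : Int} (hN : N ≠ 0) (b : Int × Int)
    (hb : PySem.Int.mod b.1 N = b.1 ∧ PySem.Int.mod b.2 N = b.2) :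
    ((!(PySem.Int.mod τ N == b.2)) && (decide (b.1 % (N.natAbs : Int) < τ) && decide (τ ≤ pvD N b)))
      = (decide (b.1 % (N.natAbs : Int) < τ) && decide (τ + 1 ≤ pvD N b)) := by
  have hbp : pvD N (b.1, b.2) = pvD N b := rfl
  have hbd := pvD_bounds hN b
  by_cases h1 : b.1 % (N.natAbs : Int) < τ ∧ τ ≤ pvD N b
  · have hiff := pvD_key hN hb.1 hb.2 h1.1 (hbp ▸ h1.2)
    rw [hbp] at hiff
    by_cases h2 : pvD N b = τ
    · simp [hiff.mpr h2, h2]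
    · have h3 : (PySem.Int.mod τ N == b.2) = false := by
        simp only [beq_eq_false_iff_ne, ne_eq]
        exact fun hc => h2 (hiff.mp hc)
      have h4 : τ + 1 ≤ pvD N b := by omega
      simp [h1.2, h3, h4]
  · rcases not_and_or.mp h1 with h | h
    · simp only [decide_eq_false h, Bool.false_and, Bool.and_false]
    · have h5 : ¬ τ + 1 ≤ pvD N b := by omega
      simp only [decide_eq_false h, decide_eq_false h5, Bool.and_false]

-- step b) of the loop body as one fold over the moved belt
lemma body_eq (pos' delivered : Int) (onBelt : List (Int × Int)) :
    ((onBelt.map (fun b => (pos', b.2))).foldl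
      (fun s b => (if b.1 == b.2 then s.1 + 1 else s.1,
                   if b.1 == b.2 then s.2 else s.2 ++ [b]))
      (delivered, ([] : List (Int × Int))))
    = (delivered + (onBelt.countP (fun b => pos' == b.2) : Int),
       (onBelt.filter (fun b => !(pos' == b.2))).map (fun b => (pos', b.2))) := by
  rw [PySem.List.foldl_prod_mk (f := fun a (b : Int × Int) => if b.1 == b.2 then a + 1 else a)
      (g := fun (acc : List (Int × Int)) b => if b.1 == b.2 then acc else acc ++ [b])]
  rw [Prod.mk.injEq]
  refine ⟨?_, ?_⟩
  · rw [PySem.List.foldl_if_add_one, List.countP_map]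
    rfl
  · have hg : (fun (acc : List (Int × Int)) (b : Int × Int) => if b.1 == b.2 then acc else acc ++ [b])
        = fun acc b => if !(b.1 == b.2) then acc ++ [b] else acc := by
      funext acc b; cases h : (b.1 == b.2)
      · simp
      · simp
    rw [hg, PySem.List.foldl_append_if_eq_filter, List.filter_map]
    simp only [List.nil_append]
    rfl

lemma contains_erase (d : PySem.Dict Int (List Int)) (pos k : Int) :
    ((d.erase pos).contains k = true) ↔ (k ≠ pos ∧ d.contains k = true) := by
  simp only [PySem.Dict.erase, PySem.Dict.contains, List.any_filter, List.any_eq_true]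
  constructor
  · rintro ⟨p, hp, h⟩
    simp only [Bool.and_eq_true, Bool.not_eq_true', beq_iff_eq, beq_eq_false_iff_ne] at h
    exact ⟨h.2 ▸ h.1, ⟨p, hp, by simpa using h.2⟩⟩
  · rintro ⟨hne, p, hp, h⟩
    refine ⟨p, hp, ?_⟩
    simp only [beq_iff_eq] at h
    simp [h, hne]

lemma getD_erase_of_ne (d : PySem.Dict Int (List Int)) {pos k : Int} (h : k ≠ pos) :
    (d.erase pos).getD k [] = d.getD k [] := by
  simp only [PySem.Dict.erase, PySem.Dict.getD, PySem.Dict.get?]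
  congr 2
  induction d.items with
  | nil => rfl
  | cons p rest ih =>
    rw [List.filter_cons]
    cases hp : (!p.1 == pos) with
    | false =>
      have hpk : (p.1 == k) = false := by
        simp only [Bool.not_eq_false', beq_iff_eq] at hp
        simp [hp, Ne.symm h]
      rw [if_neg (by exact hp ▸ Bool.false_ne_true), List.find?_cons, hpk, ih]
    | true =>
      rw [if_pos (by simp_all), List.find?_cons, List.find?_cons]
      cases hpk : (p.1 == k) with
      | false => exact ih
      | true => rfl

-- disjoint partition of a filter, up to permutation
lemma filter_partition_perm {α : Type} (l : List α) (p q r : α → Bool)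
    (hpq : ∀ x, ¬(p x = true ∧ q x = true)) (hr : ∀ x, r x = (p x || q x)) :
    (l.filter p ++ l.filter q).Perm (l.filter r) := by
  induction l with
  | nil => simp
  | cons a l ih =>
    by_cases hp : p a = true
    · have hq : q a = false := by
        have := hpq a; cases hqa : q a
        · rfl
        · exact absurd ⟨hp, hqa⟩ this
      simp only [List.filter_cons, hp, hq, hr, Bool.true_or, if_true, Bool.false_eq_true, if_false]
      exact (ih.cons a)
    · have hp' : p a = false := by simpa using hp
      by_cases hq : q a = true
      · simp only [List.filter_cons, hp', hq, hr, Bool.false_or, if_true, Bool.false_eq_true,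
          if_false]
        exact (List.perm_middle.trans (ih.cons a))
      · have hq' : q a = false := by simpa using hq
        simp only [List.filter_cons, hp', hq', hr, Bool.false_or, Bool.false_eq_true, if_false]
        exact ih

lemma count_split (N τ : Int) (L : List (Int × Int)) :
    L.countP (fun b => decide (τ ≤ pvD N b))
      = L.countP (fun b => decide (pvD N b = τ)) + L.countP (fun b => decide (τ + 1 ≤ pvD N b)) := by
  have hperm := filter_partition_perm L (fun b => decide (pvD N b = τ))
    (fun b => decide (τ + 1 ≤ pvD N b)) (fun b => decide (τ ≤ pvD N b))
    (by intro x; simp; omega)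
    (by intro x; rw [Bool.eq_iff_iff]; simp; omega)
  have hlen := hperm.length_eq
  simp only [List.length_append] at hlen
  simp only [List.countP_eq_length_filter]
  omega

lemma pvLoopA_inv (N : Int) (baggage : List (Int × Int)) (maxD : Int) (hN : N ≠ 0)
    (hb : ∀ b ∈ baggage, PySem.Int.mod b.1 N = b.1 ∧ PySem.Int.mod b.2 N = b.2)
    (hmax : ∀ b ∈ baggage, pvD N b ≤ maxD) (hex : ∃ b ∈ baggage, pvD N b = maxD) :
    ∀ (fuel : Nat) (τ : Int) (waiting : PySem.Dict Int (List Int)) (onBelt : List (Int × Int)),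
      0 ≤ τ → τ ≤ maxD + 1 → (maxD + 1 - τ).toNat ≤ fuel →
      (∀ k, waiting.contains k = true ↔ (τ ≤ k % (N.natAbs : Int) ∧ ∃ b ∈ baggage, b.1 = k)) →
      (∀ k, τ ≤ k % (N.natAbs : Int) →
        waiting.getD k [] = (baggage.filter (fun b => b.1 == k)).map (·.2)) →
      (∀ b ∈ onBelt, b.1 = PySem.Int.mod (τ - 1) N) →
      ((onBelt.map Prod.snd).Perm
        ((baggage.filter (fun b => decide (b.1 % (N.natAbs : Int) < τ)
          && decide (τ ≤ pvD N b))).map Prod.snd)) →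
      pvLoopA N (baggage.length : Int) fuel waiting onBelt
        ((baggage.length : Int) - (baggage.countP (fun b => decide (τ ≤ pvD N b)) : Int)) τ
        = maxD + 1 := by
  have hM : (0:Int) < (N.natAbs : Int) := by
    have := Int.natAbs_pos.mpr hN; omega
  intro fuel
  induction fuel with
  | zero =>
    intro τ waiting onBelt hτ0 hτle hfuel _ _ _ _
    simp only [pvLoopA]
    omega
  | succ fuel ih =>
    intro τ waiting onBelt hτ0 hτle hfuel HC HG H1 H2
    by_cases hend : τ = maxD + 1
    · have hcnt : baggage.countP (fun b => decide (τ ≤ pvD N b)) = 0 :=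
        List.countP_eq_zero.mpr (by
          intro b hbm
          have := hmax b hbm
          simp only [decide_eq_true_eq]
          omega)
      simp only [pvLoopA]
      rw [if_neg (by rw [hcnt]; simp)]
      exact hend
    · -- the loop body runs
      have hpos : 0 < baggage.countP (fun b => decide (τ ≤ pvD N b)) := by
        obtain ⟨b, hbm, hbd⟩ := hex
        exact List.countP_pos_iff.mpr ⟨b, hbm, by simp only [decide_eq_true_eq]; omega⟩
      simp only [pvLoopA]
      rw [if_pos (by omega)]
      -- every on-belt bag moves to station (PySem.Int.mod τ N)
      have hmv : onBelt.map (fun b => (PySem.Int.mod (b.1 + 1) N, b.2))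
          = onBelt.map (fun b => (PySem.Int.mod τ N, b.2)) :=
        List.map_congr_left (fun b hbm => by rw [H1 b hbm, fm_step hN])
      rw [hmv, body_eq]
      -- the number of bags delivered this minute
      have hcntmove : onBelt.countP (fun b => PySem.Int.mod τ N == b.2)
          = baggage.countP (fun b => decide (pvD N b = τ)) := by
        calc onBelt.countP (fun b => PySem.Int.mod τ N == b.2)
            = (onBelt.map Prod.snd).countP (fun t => PySem.Int.mod τ N == t) :=
              List.countP_map.symm
          _ = ((baggage.filter (fun b => decide (b.1 % (N.natAbs : Int) < τ)
                && decide (τ ≤ pvD N b))).map Prod.snd).countP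
                (fun t => PySem.Int.mod τ N == t) := H2.countP_eq _
          _ = (baggage.filter (fun b => decide (b.1 % (N.natAbs : Int) < τ)
                && decide (τ ≤ pvD N b))).countP (fun b => PySem.Int.mod τ N == b.2) :=
              List.countP_map
          _ = baggage.countP (fun b => (PySem.Int.mod τ N == b.2)
                && (decide (b.1 % (N.natAbs : Int) < τ) && decide (τ ≤ pvD N b))) :=
              List.countP_filter
          _ = baggage.countP (fun b => decide (pvD N b = τ)) := by
              rw [List.countP_eq_length_filter, List.countP_eq_length_filter,
                List.filter_congr (fun b hbm => point_count hN b (hb b hbm))]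
      -- the bags that stay on the belt, as a permutation
      have hrem : (((onBelt.filter (fun b => !(PySem.Int.mod τ N == b.2))).map
            (fun b => (PySem.Int.mod τ N, b.2))).map Prod.snd).Perm
          ((baggage.filter (fun b => decide (b.1 % (N.natAbs : Int) < τ)
            && decide (τ + 1 ≤ pvD N b))).map Prod.snd) := by
        have hsnd : ((onBelt.filter (fun b => !(PySem.Int.mod τ N == b.2))).map
              (fun b => (PySem.Int.mod τ N, b.2))).map Prod.snd
            = (onBelt.map Prod.snd).filter (fun t => !(PySem.Int.mod τ N == t)) := by
          rw [List.map_map, List.filter_map]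
          rfl
        rw [hsnd]
        refine (H2.filter _).trans ?_
        have h2 : ((baggage.filter (fun b => decide (b.1 % (N.natAbs : Int) < τ)
              && decide (τ ≤ pvD N b))).map Prod.snd).filter
                (fun t => !(PySem.Int.mod τ N == t))
            = ((baggage.filter (fun b => decide (b.1 % (N.natAbs : Int) < τ)
                && decide (τ ≤ pvD N b))).filter
                (fun b => !(PySem.Int.mod τ N == b.2))).map Prod.snd := List.filter_map
        rw [h2, List.filter_filter,
          List.filter_congr (fun b hbm => point_rem hN b (hb b hbm))]
      -- the new delivered count
      have harith : (baggage.length : Int)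
            - (baggage.countP (fun b => decide (τ ≤ pvD N b)) : Int)
            + (onBelt.countP (fun b => PySem.Int.mod τ N == b.2) : Int)
          = (baggage.length : Int)
            - (baggage.countP (fun b => decide (τ + 1 ≤ pvD N b)) : Int) := by
        have := count_split N τ baggage
        rw [hcntmove]
        omega
      have hfst : ∀ b ∈ (onBelt.filter (fun b => !(PySem.Int.mod τ N == b.2))).map
          (fun b => (PySem.Int.mod τ N, b.2)), b.1 = PySem.Int.mod (τ + 1 - 1) N := by
        intro b hbm
        obtain ⟨c, _, rfl⟩ := List.mem_map.mp hbm
        rw [show τ + 1 - 1 = τ by ring]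
      by_cases hct : waiting.contains (PySem.Int.mod τ N) = true
      · -- bags are loaded at the current station
        obtain ⟨hτk, hocc⟩ := (HC _).mp hct
        have hlp : (PySem.Int.mod τ N) % (N.natAbs : Int) = τ % (N.natAbs : Int) := load_pos N τ
        have hτM : τ % (N.natAbs : Int) = τ := by
          have := emod_le_self hτ0 hM
          omega
        rw [if_pos hct, harith, HG _ hτk]
        have hloadeq : baggage.filter (fun b => b.1 == PySem.Int.mod τ N)
            = baggage.filter (fun b => decide (b.1 % (N.natAbs : Int) = τ)
                && decide (τ + 1 ≤ pvD N b)) := by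
          refine List.filter_congr (fun b hbm => ?_)
          have hbd := pvD_bounds hN b
          rw [Bool.eq_iff_iff]
          simp only [beq_iff_eq, Bool.and_eq_true, decide_eq_true_eq]
          constructor
          · intro h
            have h1 : b.1 % (N.natAbs : Int) = τ := by rw [h, hlp, hτM]
            exact ⟨h1, by omega⟩
          · intro h
            exact canon_residue_eq hN (hb b hbm).1 (by omega)
        refine ih (τ + 1) _ _ (by omega) (by omega) (by omega) ?_ ?_ ?_ ?_
        · intro k
          rw [contains_erase, HC k]
          constructor
          · rintro ⟨h1, h2, b, hbm, rfl⟩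
            refine ⟨?_, ⟨b, hbm, rfl⟩⟩
            rcases lt_or_eq_of_le h2 with h3 | h3
            · omega
            · exact absurd (canon_residue_eq hN (hb b hbm).1 (by omega)) h1
          · rintro ⟨h1, h2⟩
            refine ⟨?_, by omega, h2⟩
            intro hk
            rw [hk, hlp] at h1
            omega
        · intro k hk
          refine (getD_erase_of_ne _ ?_).trans (HG k (by omega))
          intro hk2
          rw [hk2, hlp] at hk
          omega
        · intro b hbm
          rcases List.mem_append.mp hbm with h | h
          · exact hfst b h
          · obtain ⟨c, _, rfl⟩ := List.mem_map.mp h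
            rw [show τ + 1 - 1 = τ by ring]
        · rw [List.map_append]
          have hload2 : (((baggage.filter (fun b => b.1 == PySem.Int.mod τ N)).map
                (fun b => b.2)).map (fun t => (PySem.Int.mod τ N, t))).map Prod.snd
              = (baggage.filter (fun b => decide (b.1 % (N.natAbs : Int) = τ)
                  && decide (τ + 1 ≤ pvD N b))).map Prod.snd := by
            rw [List.map_map, List.map_map, hloadeq]
            rfl
          rw [hload2]
          refine (hrem.append (List.Perm.refl _)).trans ?_
          rw [← List.map_append]
          refine List.Perm.map _ ?_
          refine filter_partition_perm baggage _ _ _ ?_ ?_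
          · intro x
            simp only [Bool.and_eq_true, decide_eq_true_eq]
            omega
          · intro x
            rw [Bool.eq_iff_iff]
            simp only [Bool.or_eq_true, Bool.and_eq_true, decide_eq_true_eq]
            omega
      · -- no bag is waiting at the current station this minute
        rw [if_neg hct, harith]
        have hocc : ∀ b ∈ baggage, b.1 % (N.natAbs : Int) ≠ τ := by
          intro b hbm heq
          have hτM : τ % (N.natAbs : Int) = τ := by
            have h1 := Int.emod_nonneg b.1 (by omega : (N.natAbs : Int) ≠ 0)
            have h2 := Int.emod_lt_of_pos b.1 hM
            exact Int.emod_eq_of_lt (by omega) (by omega)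
          have hbp : b.1 = PySem.Int.mod τ N :=
            canon_residue_eq hN (hb b hbm).1 (by omega)
          exact hct ((HC (PySem.Int.mod τ N)).mpr
            ⟨by rw [load_pos N τ]; omega, ⟨b, hbm, hbp⟩⟩)
        refine ih (τ + 1) waiting _ (by omega) (by omega) (by omega) ?_ ?_ hfst ?_
        · intro k
          rw [HC k]
          constructor
          · rintro ⟨h1, b, hbm, rfl⟩
            exact ⟨by have := hocc b hbm; omega, ⟨b, hbm, rfl⟩⟩
          · rintro ⟨h1, h2⟩
            exact ⟨by omega, h2⟩
        · intro k hk
          exact HG k (by omega)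
        · refine hrem.trans (List.Perm.of_eq (congrArg (List.map Prod.snd) ?_))
          refine List.filter_congr (fun b hbm => ?_)
          have := hocc b hbm
          rw [Bool.eq_iff_iff]
          simp only [Bool.and_eq_true, decide_eq_true_eq]
          omega

lemma pv_final_eq (N : Int) (baggage : List (Int × Int)) (hN : N ≠ 0)
    (hb : ∀ b ∈ baggage, PySem.Int.mod b.1 N = b.1 ∧ PySem.Int.mod b.2 N = b.2) :
    baggage_schedule_final N baggage = baggage_schedule_final_alt N baggage := by
  have hM : (0:Int) < (N.natAbs : Int) := by
    have := Int.natAbs_pos.mpr hN; omega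
  by_cases hne : baggage = []
  · subst hne; rfl
  · have hEmpty : baggage.isEmpty = false := by simpa [List.isEmpty_iff] using hne
    simp only [baggage_schedule_final, baggage_schedule_final_alt, hEmpty, Bool.false_eq_true,
      if_false]
    have hfd : baggage.map (fun b => PySem.Int.mod b.1 (N.natAbs : Int)
          + PySem.Int.mod (b.2 - b.1 - 1) (N.natAbs : Int) + 1)
        = baggage.map (pvD N) :=
      List.map_congr_left (fun b _ => by
        rw [PySem.Int.mod_eq_emod_of_pos hM, PySem.Int.mod_eq_emod_of_pos hM]
        rfl)
    rw [hfd]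
    obtain ⟨m, hm⟩ : ∃ m, PySem.List.max? (baggage.map (pvD N)) (fun x => x) = some m := by
      cases h : PySem.List.max? (baggage.map (pvD N)) (fun x => x) with
      | none =>
        have := (PySem.List.max?_eq_none_iff _ _).mp h
        simp only [List.map_eq_nil_iff] at this
        exact absurd this hne
      | some m => exact ⟨m, rfl⟩
    rw [hm]
    obtain ⟨b0, hb0, hb0m⟩ := List.mem_map.mp (PySem.List.max?_mem hm)
    have hmax : ∀ b ∈ baggage, pvD N b ≤ m :=
      fun b hbm => PySem.List.max?_isMax hm _ (List.mem_map_of_mem hbm)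
    have hb0b := pvD_bounds hN b0
    have hb0l0 : 0 ≤ b0.1 % (N.natAbs : Int) := Int.emod_nonneg _ (by omega)
    have hb0lM : b0.1 % (N.natAbs : Int) < (N.natAbs : Int) := Int.emod_lt_of_pos _ hM
    have HC0 : ∀ k, (pvBuildWaiting baggage).contains k = true
        ↔ ((0:Int) ≤ k % (N.natAbs : Int) ∧ ∃ b ∈ baggage, b.1 = k) := by
      intro k
      rw [PySem.Dict.contains_iff_mem_keys]
      unfold pvBuildWaiting
      rw [PySem.Dict.keys_foldl_modify_key]
      rw [PySem.Dict.keys_empty]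
      rw [show PySem.Set.update ([] : List Int) (baggage.map (fun p => p.1))
            = PySem.Set.ofList (baggage.map (fun p => p.1)) from rfl]
      rw [PySem.Set.mem_ofList]
      constructor
      · intro h
        obtain ⟨b, hbm, rfl⟩ := List.mem_map.mp h
        exact ⟨Int.emod_nonneg _ (by omega), ⟨b, hbm, rfl⟩⟩
      · rintro ⟨h0, b, hbm, rfl⟩
        exact List.mem_map_of_mem hbm
    have HG0 : ∀ k, (0:Int) ≤ k % (N.natAbs : Int) → (pvBuildWaiting baggage).getD k []
        = (baggage.filter (fun b => b.1 == k)).map (·.2) := by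
      intro k _
      unfold pvBuildWaiting
      rw [PySem.Dict.getD_foldl_modify_append]
      rw [PySem.Dict.getD_empty, List.nil_append]
    have hfilt0 : baggage.filter (fun b => decide (b.1 % (N.natAbs : Int) < (0:Int))
          && decide ((0:Int) ≤ pvD N b)) = [] :=
      List.filter_eq_nil_iff.mpr (fun b hbm => by
        have := Int.emod_nonneg b.1 (by omega : (N.natAbs : Int) ≠ 0)
        simp only [Bool.and_eq_true, decide_eq_true_eq, not_and]
        omega)
    have hinv := pvLoopA_inv N baggage m hN hb hmax ⟨b0, hb0, hb0m⟩ (2 * N.natAbs + 2) 0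
      (pvBuildWaiting baggage) [] le_rfl (by omega) (by omega) HC0 HG0
      (by intro b h; simp at h)
      (by rw [hfilt0])
    have hcnt0 : (baggage.countP (fun b => decide ((0:Int) ≤ pvD N b)) : Int)
        = (baggage.length : Int) := by
      rw [List.countP_eq_length.mpr (fun b hbm => by
        have := pvD_bounds hN b
        have := Int.emod_nonneg b.1 (by omega : (N.natAbs : Int) ≠ 0)
        simp only [decide_eq_true_eq]
        omega)]
    rw [show (baggage.length : Int)
          - (baggage.countP (fun b => decide ((0:Int) ≤ pvD N b)) : Int) = 0 from by omega] at hinv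
    simpa using hinv

-- ===== VERDICT (by name: the statement is the Claim_ definition above) =====
theorem baggage_schedule_final_spec : Claim_equal_baggage_schedule_final := by
  intro N baggage _ hpre
  show baggage_schedule_final N baggage = baggage_schedule_final_alt N baggage
  rcases hpre with rfl | ⟨hN, hb⟩
  · rfl
  · exact pv_final_eq N baggage hN hb
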